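-- pv_equiv track=rewrite | github.com/Akshat3422/SalesAutoAgent | sales/agent/graph.py | _pick_best_email
-- ===== SOURCE A (Python) =====
-- from typing import Dict, Any, List, TypedDict, Optional, Tuple
--
-- BUSINESS_EMAIL_PREFIXES = (
--     "info@", "hello@", "sales@", "contact@", "support@", "business@", "partnerships@"
-- )
--
-- def _pick_best_email(emails: List[str]) -> Optional[str]:
--     if not emails:
--         return None
--     for prefix in BUSINESS_EMAIL_PREFIXES:
--         for email in emails:
--             if email.startswith(prefix):
--                 return email
--     return emails[0]
-- ===== SOURCE B (Python) =====
-- BUSINESS_EMAIL_PREFIXES = (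
--     "info@", "hello@", "sales@", "contact@", "support@", "business@", "partnerships@"
-- )
--
-- def _rank(email):
--     for i, p in enumerate(BUSINESS_EMAIL_PREFIXES):
--         if email.startswith(p):
--             return i
--     return len(BUSINESS_EMAIL_PREFIXES)
--
-- def _pick_best_email(emails):
--     if not emails:
--         return None
--     best = emails[0]
--     best_rank = _rank(best)
--     for email in emails[1:]:
--         r = _rank(email)
--         if r < best_rank:
--             best, best_rank = email, r
--     return best
-- ===== Notes on version B (the rewrite author's own statement) =====
-- stated objective: alternative
-- what changed: Replaced A's prefix-major nested scan (for each prefix, scan all emails) by a single email-major pass that computes each email's priority rank (index of the first matching prefix, or 7 if none) and keeps the first email with the smallest rank; the strict-< update preserves A's first-wins tie-break and the no-match fallback to emails[0].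
import Mathlib
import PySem

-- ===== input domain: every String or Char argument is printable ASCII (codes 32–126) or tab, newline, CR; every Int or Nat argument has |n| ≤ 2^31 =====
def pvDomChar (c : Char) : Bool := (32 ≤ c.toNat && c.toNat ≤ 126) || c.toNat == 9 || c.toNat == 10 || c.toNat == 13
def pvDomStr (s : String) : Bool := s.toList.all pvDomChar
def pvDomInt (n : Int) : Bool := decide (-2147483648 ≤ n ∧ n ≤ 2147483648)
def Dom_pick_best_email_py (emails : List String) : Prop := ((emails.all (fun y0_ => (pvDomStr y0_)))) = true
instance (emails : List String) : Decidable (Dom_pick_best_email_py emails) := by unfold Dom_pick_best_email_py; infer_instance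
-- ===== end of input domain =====

-- B replaces the prefix-major nested scan by one email-major argmin pass over prefix ranks (objective: alternative decomposition); same return value.
-- ===== PORT A =====
def pvPrefixes : List String :=
  ["info@", "hello@", "sales@", "contact@", "support@", "business@", "partnerships@"]

-- inner 'for email in emails: if email.startswith(prefix): return email' is List.find?; outer prefix loop is this recursion
def pickA_loop (ps : List String) (emails : List String) : Option String :=
  match ps with
  | [] => none
  | p :: t =>
    match emails.find? (fun e => PySem.Str.startswith e p) with
    | some e => some e
    | none => pickA_loop t emails

def pick_best_email_py (emails : List String) : Option String :=
  match emails with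
  | [] => none
  | e0 :: _ =>
    match pickA_loop pvPrefixes emails with
    | some e => some e
    | none => some e0

-- ===== PORT B =====
-- _rank: index of the first matching prefix, or len(prefixes) if none — exactly List.findIdx
def pvRank (ps : List String) (e : String) : Nat :=
  ps.findIdx (fun p => PySem.Str.startswith e p)

-- the 'for email in emails[1:]' argmin loop, state (best, best_rank)
def pickB_loop (ps : List String) (rest : List String) (best : String) (bestRank : Nat) : String :=
  match rest with
  | [] => best
  | e :: t =>
    let r := pvRank ps e
    if r < bestRank then pickB_loop ps t e r else pickB_loop ps t best bestRank

def pick_best_email_py_alt (emails : List String) : Option String :=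
  match emails with
  | [] => none
  | e0 :: rest => some (pickB_loop pvPrefixes rest e0 (pvRank pvPrefixes e0))

-- ===== PRECONDITION & SPEC =====
def Spec_pick_best_email_py (emails : List String) (out : Option String) : Prop := out = pick_best_email_py_alt emails
instance (emails : List String) (out : Option String) : Decidable (Spec_pick_best_email_py emails out) := by unfold Spec_pick_best_email_py; infer_instance

-- ===== CLAIM (what is proved, stated in full; the proofs are below) =====
def Claim_equal_pick_best_email_py : Prop := ∀ (emails : List String), Dom_pick_best_email_py emails → Spec_pick_best_email_py emails (pick_best_email_py emails)

-- ===== LEMMAS AND PROOFS =====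
-- rank 0 is the global minimum of a Nat-valued rank: the loop never replaces a rank-0 best
theorem pickB_loop_zero (ps : List String) (rest : List String) (best : String) :
    pickB_loop ps rest best 0 = best := by
  induction rest with
  | nil => rfl
  | cons e t ih => simp [pickB_loop, ih]

-- if the current best has rank ≥ 1 and e is the first element of rest with rank 0, the loop returns e
theorem pickB_loop_finds_zero (ps : List String) (e : String) (he : pvRank ps e = 0) :
    ∀ (l1 l2 : List String) (best : String) (bR : Nat), 1 ≤ bR →
      (∀ x ∈ l1, pvRank ps x ≠ 0) →
      pickB_loop ps (l1 ++ e :: l2) best bR = e := by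
  intro l1
  induction l1 with
  | nil =>
    intro l2 best bR hbR _
    simp only [List.nil_append, pickB_loop, he]
    have : 0 < bR := hbR
    simp [this, pickB_loop_zero]
  | cons x t ih =>
    intro l2 best bR hbR hl
    have hx : pvRank ps x ≠ 0 := hl x (by simp)
    have hx1 : 1 ≤ pvRank ps x := Nat.one_le_iff_ne_zero.mpr hx
    have ht : ∀ y ∈ t, pvRank ps y ≠ 0 := fun y hy => hl y (by simp [hy])
    simp only [List.cons_append, pickB_loop]
    by_cases h : pvRank ps x < bR
    · simp [h, ih l2 x (pvRank ps x) hx1 ht]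
    · simp [h, ih l2 best bR hbR ht]

-- shifting every rank by one (the head prefix matches nothing) does not change the argmin loop
theorem pickB_loop_shift (p : String) (t : List String) :
    ∀ (rest : List String) (best : String) (bR : Nat),
      (∀ x ∈ rest, PySem.Str.startswith x p = false) →
      pickB_loop (p :: t) rest best (bR + 1) = pickB_loop t rest best bR := by
  intro rest
  induction rest with
  | nil => intro best bR _; rfl
  | cons e r ih =>
    intro best bR hno
    have he : PySem.Str.startswith e p = false := hno e (by simp)
    have hr : ∀ x ∈ r, PySem.Str.startswith x p = false := fun x hx => hno x (by simp [hx])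
    simp only [pickB_loop, pvRank, List.findIdx_cons, he, cond_false]
    by_cases h : List.findIdx (fun q => PySem.Str.startswith e q) t < bR
    · have h' : List.findIdx (fun q => PySem.Str.startswith e q) t + 1 < bR + 1 := by omega
      simp only [h', if_pos, h, if_pos]
      exact ih e _ hr
    · have h' : ¬ (List.findIdx (fun q => PySem.Str.startswith e q) t + 1 < bR + 1) := by omega
      simp only [h', if_neg, h, if_neg, not_false_iff]
      exact ih best bR hr

theorem pick_main (ps : List String) :
    ∀ (e0 : String) (rest : List String),
      (match pickA_loop ps (e0 :: rest) with
       | some e => some e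
       | none => some e0) = some (pickB_loop ps rest e0 (pvRank ps e0)) := by
  induction ps with
  | nil =>
    intro e0 rest
    simp [pickA_loop, pvRank, pickB_loop_zero]
  | cons p t ih =>
    intro e0 rest
    rcases hf : (e0 :: rest).find? (fun e => PySem.Str.startswith e p) with _ | e
    · -- no email starts with p: all ranks shift by one, reduce to IH
      have hno : ∀ x ∈ e0 :: rest, PySem.Str.startswith x p = false := by
        intro x hx
        have := List.find?_eq_none.mp hf x hx
        simpa using this
      have he0 : PySem.Str.startswith e0 p = false := hno e0 (by simp)
      have hrest : ∀ x ∈ rest, PySem.Str.startswith x p = false := fun x hx => hno x (by simp [hx])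
      have hrank : pvRank (p :: t) e0 = pvRank t e0 + 1 := by
        simp only [PySem.Str.startswith_eq] at he0
        simp [pvRank, List.findIdx_cons, he0]
      simp only [pickA_loop, hf, hrank, pickB_loop_shift p t rest e0 (pvRank t e0) hrest]
      exact ih e0 rest
    · -- e is the first email starting with p
      have hdec := List.find?_eq_some_iff_append.mp hf
      obtain ⟨hpe, l1, l2, hsplit, hbefore⟩ := hdec
      have hre : pvRank (p :: t) e = 0 := by
        have hpe' := hpe
        simp only [PySem.Str.startswith_eq] at hpe'
        simp [pvRank, List.findIdx_cons, hpe']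
      simp only [pickA_loop, hf]
      cases l1 with
      | nil =>
        have he0 : e0 = e := by simpa using congrArg (fun l => l.head?) hsplit
        subst he0
        simp [hre, pickB_loop_zero]
      | cons y l1' =>
        have hy : y = e0 ∧ rest = l1' ++ e :: l2 := by
          constructor
          · have := congrArg (fun l => l.head?) hsplit; simpa using this.symm
          · have := congrArg (fun l => l.tail) hsplit; simpa using this
        obtain ⟨hy0, hrest⟩ := hy
        have h0 : PySem.Str.startswith e0 p = false := by
          have := hbefore y (by simp)
          rw [hy0] at this; simpa using this
        have hr0 : pvRank (p :: t) e0 ≠ 0 := by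
          have h0' := h0
          simp only [PySem.Str.startswith_eq] at h0'
          simp [pvRank, List.findIdx_cons, h0']
        have hb : ∀ x ∈ l1', pvRank (p :: t) x ≠ 0 := by
          intro x hx
          have hxs := hbefore x (by simp [hx])
          have hxf : PySem.Str.startswith x p = false := by
            cases hb : PySem.Str.startswith x p
            · rfl
            · rw [hb] at hxs; simp at hxs
          simp only [PySem.Str.startswith_eq] at hxf
          simp [pvRank, List.findIdx_cons, hxf]
        rw [hrest]
        rw [pickB_loop_finds_zero (p :: t) e hre l1' l2 e0 (pvRank (p :: t) e0)
          (Nat.one_le_iff_ne_zero.mpr hr0) hb]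

-- ===== VERDICT (by name: the statement is the Claim_ definition above) =====
theorem pick_best_email_py_spec : Claim_equal_pick_best_email_py := by
  intro emails _
  unfold Spec_pick_best_email_py
  cases emails with
  | nil => rfl
  | cons e0 rest =>
    simp only [pick_best_email_py, pick_best_email_py_alt]
    exact pick_main pvPrefixes e0 rest
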